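-- pv_equiv track=rewrite | github.com/kulsuri/playground | daily_coding_problem/solutions/problem_11.py | get_autocomplete_suggestions
-- ===== SOURCE A (Python) =====
-- def get_autocomplete_suggestions(s, query_strings):
--
--     Hash = dict()
--
--     for i in query_strings:
--         if i[:2] in Hash:
--
--             Hash[ i[:2] ].append(i)
--         else:
--             Hash[ i[:2] ] = [i]
--
--     if s not in Hash:
--         answer = []
--     else:
--         answer = Hash[s]
--
--     return answer
-- ===== SOURCE B (Python) =====
-- def get_autocomplete_suggestions(s, query_strings):
--     return [i for i in query_strings if i[:2] == s]
-- ===== Notes on version B (the rewrite author's own statement) =====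
-- stated objective: simpler
-- what changed: Drops the prefix-bucket dictionary entirely and returns a single filtering pass over query_strings keeping the strings whose first two characters equal s.
import Mathlib
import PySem

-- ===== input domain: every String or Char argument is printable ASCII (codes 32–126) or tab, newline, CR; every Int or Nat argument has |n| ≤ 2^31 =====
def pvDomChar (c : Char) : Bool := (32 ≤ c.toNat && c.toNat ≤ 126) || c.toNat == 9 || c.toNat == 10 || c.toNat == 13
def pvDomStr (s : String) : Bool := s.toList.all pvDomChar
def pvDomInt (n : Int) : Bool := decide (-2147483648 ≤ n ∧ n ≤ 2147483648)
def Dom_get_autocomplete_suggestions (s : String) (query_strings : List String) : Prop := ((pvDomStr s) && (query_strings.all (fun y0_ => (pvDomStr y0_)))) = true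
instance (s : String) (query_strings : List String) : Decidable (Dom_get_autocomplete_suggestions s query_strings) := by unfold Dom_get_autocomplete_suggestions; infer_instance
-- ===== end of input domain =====

-- B replaces A's prefix-bucket dictionary with a single filtering pass (simpler, same return value).

-- ===== PORT A =====
-- the loop body: bucket i under its two-character prefix
def pvStepA (H : PySem.Dict String (List String)) (i : String) : PySem.Dict String (List String) :=
  if H.contains (PySem.Str.slice i none (some 2)) then
    H.modify (PySem.Str.slice i none (some 2)) [] (fun l => l ++ [i])
  else
    H.insert (PySem.Str.slice i none (some 2)) [i]

def get_autocomplete_suggestions (s : String) (query_strings : List String) : List String :=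
  let Hash := query_strings.foldl pvStepA PySem.Dict.empty
  if ¬ Hash.contains s then [] else (Hash.get? s).getD []

-- ===== PORT B =====
def get_autocomplete_suggestions_alt (s : String) (query_strings : List String) : List String :=
  query_strings.filter (fun i => PySem.Str.slice i none (some 2) == s)

-- ===== PRECONDITION & SPEC =====
def Spec_get_autocomplete_suggestions (s : String) (query_strings : List String) (out : List String) : Prop := out = get_autocomplete_suggestions_alt s query_strings
instance (s : String) (query_strings : List String) (out : List String) : Decidable (Spec_get_autocomplete_suggestions s query_strings out) := by unfold Spec_get_autocomplete_suggestions; infer_instance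

-- ===== CLAIM (what is proved, stated in full; the proofs are below) =====
def Claim_equal_get_autocomplete_suggestions : Prop := ∀ (s : String) (query_strings : List String), Dom_get_autocomplete_suggestions s query_strings → Spec_get_autocomplete_suggestions s query_strings (get_autocomplete_suggestions s query_strings)

-- ===== LEMMAS AND PROOFS =====

-- invariant of A's bucketing loop: the bucket at s collects exactly the matches, in order
theorem pvFoldA_getD (s : String) (xs : List String) (d : PySem.Dict String (List String)) :
    (xs.foldl pvStepA d).getD s [] = d.getD s [] ++ xs.filter (fun i => PySem.Str.slice i none (some 2) == s) := by
  induction xs generalizing d with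
  | nil => simp
  | cons i xs ih =>
    simp only [List.foldl_cons, List.filter_cons, ih]
    have hstep : (pvStepA d i).getD s [] = d.getD s [] ++ (if PySem.Str.slice i none (some 2) == s then [i] else []) := by
      unfold pvStepA
      by_cases hc : d.contains (PySem.Str.slice i none (some 2))
      · rw [if_pos hc, PySem.Dict.getD_modify]
        by_cases he : s = PySem.Str.slice i none (some 2)
        · simp [he]
        · simp [he, Ne.symm he]
      · rw [if_neg hc, PySem.Dict.getD_insert]
        by_cases he : s = PySem.Str.slice i none (some 2)
        · subst he
          rw [PySem.Dict.getD_of_not_contains _ _ (by simpa using hc)]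
          simp
        · simp [he, Ne.symm he]
    rw [hstep]
    by_cases he : PySem.Str.slice i none (some 2) == s
    · simp [he, List.append_assoc]
    · simp [he]

-- A's final lookup equals the bucket read with default []
theorem pvLookup (H : PySem.Dict String (List String)) (s : String) :
    (if ¬ H.contains s then [] else (H.get? s).getD []) = H.getD s [] := by
  by_cases hc : H.contains s
  · simp [hc, PySem.Dict.getD_eq_get?_getD]
  · simp [hc, PySem.Dict.getD_of_not_contains _ _ (by simpa using hc)]

-- ===== VERDICT (by name: the statement is the Claim_ definition above) =====
theorem get_autocomplete_suggestions_spec : Claim_equal_get_autocomplete_suggestions := by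
  intro s qs _
  show get_autocomplete_suggestions s qs = get_autocomplete_suggestions_alt s qs
  unfold get_autocomplete_suggestions get_autocomplete_suggestions_alt
  rw [pvLookup, pvFoldA_getD]
  simp
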